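-- pv_equiv track=rewrite | github.com/sungurerdim/asrbench | asrbench/engine/compare.py | _diff_params
-- ===== SOURCE A (Python) =====
-- from typing import Any
--
-- def _diff_params(
--     param_sets: list[dict[str, Any]],
-- ) -> tuple[list[str], list[str]]:
--     """Split the union of keys into ones that differ vs ones that are identical."""
--     all_keys: set[str] = set()
--     for p in param_sets:
--         all_keys.update(p.keys())
--
--     diff: list[str] = []
--     same: list[str] = []
--     for key in sorted(all_keys):
--         first = param_sets[0].get(key)
--         if all(p.get(key) == first for p in param_sets[1:]):
--             same.append(key)
--         else:
--             diff.append(key)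
--     return diff, same
-- ===== SOURCE B (Python) =====
-- def _diff_params(param_sets):
--     """Split the union of keys into ones that differ vs ones that are identical."""
--     # Streaming single pass: for each key keep (reference value from the first
--     # param set, running all-equal flag), updated dict by dict; no value columns,
--     # no re-scan of param_sets per key.
--     status = {}  # key -> (ref, ok)
--     first = True
--     for p in param_sets:
--         for key, v in p.items():
--             if key not in status:
--                 status[key] = (v if first else None, True)
--         if not first:
--             for key, (ref, ok) in list(status.items()):
--                 status[key] = (ref, ok and p.get(key) == ref)
--         first = False
--     diff, same = [], []
--     for key in sorted(status):
--         (same if status[key][1] else diff).append(key)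
--     return diff, same
-- ===== Notes on version B (the rewrite author's own statement) =====
-- stated objective: alternative
-- what changed: B replaces A's two-stage scheme (collect key union, then for each sorted key rescan all param_sets comparing against param_sets[0].get(key)) by a single streaming pass over the dicts that maintains per key a (reference value, running all-equal flag) table updated dict by dict, classifying keys at the end from the stored flags; no per-key rescan of param_sets and no indexing of param_sets[0].
import Mathlib
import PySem

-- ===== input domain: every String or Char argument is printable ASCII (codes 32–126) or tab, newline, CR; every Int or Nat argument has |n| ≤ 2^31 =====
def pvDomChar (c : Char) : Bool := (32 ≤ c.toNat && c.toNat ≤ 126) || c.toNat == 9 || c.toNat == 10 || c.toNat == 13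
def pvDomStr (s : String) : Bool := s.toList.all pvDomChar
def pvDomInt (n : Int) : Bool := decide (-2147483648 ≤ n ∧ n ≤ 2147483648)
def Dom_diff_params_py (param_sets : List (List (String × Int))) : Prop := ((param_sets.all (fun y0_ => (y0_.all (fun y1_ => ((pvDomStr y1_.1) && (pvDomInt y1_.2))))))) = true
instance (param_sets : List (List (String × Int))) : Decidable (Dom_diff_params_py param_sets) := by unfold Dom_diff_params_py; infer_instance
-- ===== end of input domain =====

-- B replaces A's per-key rescans of param_sets by one streaming pass over the dicts that maintains,
-- per key, (reference value from the first dict, running all-equal flag); alternative decomposition, not faster.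

-- ===== PORT A =====
def diff_params_py (param_sets : List (List (String × Int))) : List String × List String :=
  let all_keys : PySem.Set String :=
    param_sets.foldl (fun s p => PySem.Set.update s (PySem.Dict.mk p).keys) PySem.Set.empty
  (PySem.List.sorted all_keys (fun k => k) false).foldl
    (fun acc key =>
      let first := (PySem.Dict.mk (param_sets.headD [])).get? key
      if (param_sets.tail).all (fun p => (PySem.Dict.mk p).get? key == first)
      then (acc.1, acc.2 ++ [key])
      else (acc.1 ++ [key], acc.2))
    ([], [])

-- ===== PORT B =====
-- body of B's outer 'for p in param_sets' loop; the state is (status, first)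
def pvStepB (p : List (String × Int)) (st : PySem.Dict String (Option Int × Bool) × Bool) :
    PySem.Dict String (Option Int × Bool) × Bool :=
  let status := (PySem.Dict.mk p).items.foldl
    (fun s kv => if s.contains kv.1 then s
                 else s.insert kv.1 ((if st.2 then some kv.2 else none), true)) st.1
  let status := if st.2 then status else
    status.items.foldl
      (fun s kr => s.insert kr.1 (kr.2.1, kr.2.2 && ((PySem.Dict.mk p).get? kr.1 == kr.2.1)))
      status
  (status, false)

def diff_params_py_alt (param_sets : List (List (String × Int))) : List String × List String :=
  let status := (param_sets.foldl (fun st p => pvStepB p st) (PySem.Dict.empty, true)).1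
  (PySem.List.sorted status.keys (fun k => k) false).foldl
    (fun acc key =>
      if ((status.get? key).getD (none, false)).2
      then (acc.1, acc.2 ++ [key])
      else (acc.1 ++ [key], acc.2))
    ([], [])

-- ===== PRECONDITION & SPEC =====
def Spec_diff_params_py (param_sets : List (List (String × Int))) (out : List String × List String) : Prop := out = diff_params_py_alt param_sets
instance (param_sets : List (List (String × Int))) (out : List String × List String) : Decidable (Spec_diff_params_py param_sets out) := by unfold Spec_diff_params_py; infer_instance

-- ===== CLAIM (what is proved, stated in full; the proofs are below) =====
def Claim_equal_diff_params_py : Prop := ∀ (param_sets : List (List (String × Int))), Dom_diff_params_py param_sets → Spec_diff_params_py param_sets (diff_params_py param_sets)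

-- ===== LEMMAS AND PROOFS =====

-- A's accumulation of key sets equals the set of the flattened key list.
theorem keyset_foldl_update (f : List (String × Int) → List String)
    (ps : List (List (String × Int))) (s : PySem.Set String) :
    ps.foldl (fun s p => PySem.Set.update s (f p)) s = (ps.flatMap f).foldl PySem.Set.add s := by
  induction ps generalizing s with
  | nil => rfl
  | cons q qs ih =>
    rw [List.flatMap_cons, List.foldl_append, List.foldl_cons, ih]
    rfl

-- lookup after B's guarded-insert loop (keys already present keep their value; fresh keys get fv)
theorem fold1_get? (kvs : List (String × Int)) (fv : Int → Option Int × Bool)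
    (s : PySem.Dict String (Option Int × Bool)) (k : String) :
    (kvs.foldl (fun s kv => if s.contains kv.1 then s else s.insert kv.1 (fv kv.2)) s).get? k
    = if s.contains k then s.get? k
      else ((kvs.find? (fun kv => kv.1 == k)).map fun kv => fv kv.2) := by
  induction kvs generalizing s with
  | nil =>
    by_cases h : s.contains k
    · simp [h]
    · simp only [List.foldl_nil, List.find?_nil, Option.map_none, if_neg h]
      rw [PySem.Dict.contains_eq_isSome_get?] at h
      simpa using h
  | cons a t ih =>
    rw [List.foldl_cons]
    by_cases ha : s.contains a.1
    · rw [if_pos ha, ih]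
      by_cases hk : s.contains k
      · simp [hk]
      · have hne : ¬ (a.1 == k) := by
          intro h; exact hk (by rwa [eq_of_beq h] at ha)
        simp [hk, hne]
    · rw [if_neg ha, ih]
      by_cases hka : k = a.1
      · have hcont : ((s.insert a.1 (fv a.2)).contains k) = true := by
          rw [PySem.Dict.contains_insert]; simp [hka]
        rw [if_pos hcont, PySem.Dict.get?_insert, if_pos hka]
        have hk : s.contains k = false := by rw [hka]; simpa using ha
        have hba : (a.1 == k) = true := beq_iff_eq.2 hka.symm
        simp [hk, hba]
      · rw [PySem.Dict.contains_insert]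
        have hbe : (k == a.1) = false := by rw [beq_eq_false_iff_ne]; exact hka
        rw [hbe, Bool.false_or, PySem.Dict.get?_insert_of_ne _ _ hka]
        have hba : (a.1 == k) = false := by
          rw [beq_eq_false_iff_ne]; exact fun h => hka h.symm
        by_cases hk : s.contains k <;> simp [hk, hba]

-- keys after B's guarded-insert loop: the fresh keys are appended in first-appearance order
theorem fold1_keys (kvs : List (String × Int)) (fv : Int → Option Int × Bool)
    (s : PySem.Dict String (Option Int × Bool)) :
    (kvs.foldl (fun s kv => if s.contains kv.1 then s else s.insert kv.1 (fv kv.2)) s).keys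
    = PySem.Set.update s.keys (kvs.map Prod.fst) := by
  induction kvs generalizing s with
  | nil => rfl
  | cons a t ih =>
    rw [List.foldl_cons, ih, List.map_cons]
    show _ = List.foldl PySem.Set.add s.keys (a.1 :: t.map Prod.fst)
    rw [List.foldl_cons]
    congr 1
    by_cases ha : s.contains a.1
    · rw [if_pos ha]
      have hm : a.1 ∈ s.keys := (PySem.Dict.contains_iff_mem_keys s a.1).1 ha
      simp [PySem.Set.add, PySem.Set.contains, hm]
    · rw [if_neg ha, PySem.Dict.keys_insert_of_not_contains _ _ (by simpa using ha)]
      have hm : a.1 ∉ s.keys := fun h => ha ((PySem.Dict.contains_iff_mem_keys s a.1).2 h)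
      simp [PySem.Set.add, PySem.Set.contains, hm]

-- step characterisation: one non-first dict updates every key's entry pointwise

-- lookup after B's re-insert (update) loop over a snapshot with distinct keys
theorem fold2_get? (l : List (String × (Option Int × Bool)))
    (g : String → Option Int × Bool → Option Int × Bool)
    (s : PySem.Dict String (Option Int × Bool)) (hn : (l.map Prod.fst).Nodup) (k : String) :
    (l.foldl (fun s kr => s.insert kr.1 (g kr.1 kr.2)) s).get? k
    = match l.find? (fun kr => kr.1 == k) with
      | some kr => some (g kr.1 kr.2)
      | none => s.get? k := by
  induction l generalizing s with
  | nil => simp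
  | cons a t ih =>
    rw [List.map_cons, List.nodup_cons] at hn
    rw [List.foldl_cons, ih _ hn.2]
    by_cases hka : k = a.1
    · subst hka
      have hfind : t.find? (fun kr => kr.1 == a.1) = none := by
        rw [List.find?_eq_none]
        intro x hx hbx
        have hm := List.mem_map_of_mem (f := Prod.fst) hx
        rw [eq_of_beq hbx] at hm
        exact absurd hm hn.1
      simp [hfind, PySem.Dict.get?_insert_self]
    · have hba : (a.1 == k) = false := by
        rw [beq_eq_false_iff_ne]; exact fun h => hka h.symm
      rw [PySem.Dict.get?_insert_of_ne _ _ hka]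
      simp [hba]

-- B's update loop only overwrites present keys, so the key list is unchanged
theorem fold2_keys (l : List (String × (Option Int × Bool)))
    (g : String → Option Int × Bool → Option Int × Bool)
    (s : PySem.Dict String (Option Int × Bool)) (h : ∀ kr ∈ l, s.contains kr.1 = true) :
    (l.foldl (fun s kr => s.insert kr.1 (g kr.1 kr.2)) s).keys = s.keys := by
  induction l generalizing s with
  | nil => rfl
  | cons a t ih =>
    rw [List.foldl_cons, ih]
    · exact PySem.Dict.keys_insert_of_contains _ _ (h a (by simp))
    · intro kr hkr
      rw [PySem.Dict.contains_insert]
      simp [h kr (by simp [hkr])]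

-- step characterisation: one non-first dict updates every key's entry pointwise
theorem stepB_false_get? (p : List (String × Int)) (s : PySem.Dict String (Option Int × Bool))
    (hnd : s.keys.Nodup) (k : String) :
    ((pvStepB p (s, false)).1).get? k
    = ((if s.contains k then s.get? k
        else (((PySem.Dict.mk p).get? k).map (fun _ => ((none : Option Int), true)))).map
        (fun r => (r.1, r.2 && ((PySem.Dict.mk p).get? k == r.1)))) := by
  have e : (pvStepB p (s, false)).1
      = (((PySem.Dict.mk p).items.foldl
            (fun s kv => if s.contains kv.1 then s
                         else s.insert kv.1 ((fun _ : Int => ((none : Option Int), true)) kv.2)) s).items.foldl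
           (fun s kr => s.insert kr.1 ((fun k r => (r.1, r.2 && ((PySem.Dict.mk p).get? k == r.1))) kr.1 kr.2))
           ((PySem.Dict.mk p).items.foldl
            (fun s kv => if s.contains kv.1 then s
                         else s.insert kv.1 ((fun _ : Int => ((none : Option Int), true)) kv.2)) s)) := rfl
  have hk1 := fold1_keys (PySem.Dict.mk p).items (fun _ : Int => ((none : Option Int), true)) s
  have hnd1 : ((PySem.Dict.mk p).items.foldl
      (fun s kv => if s.contains kv.1 then s
                   else s.insert kv.1 ((fun _ : Int => ((none : Option Int), true)) kv.2)) s).keys.Nodup := by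
    rw [hk1]; exact PySem.Set.nodup_update _ _ hnd
  have hg1 := fold1_get? (PySem.Dict.mk p).items (fun _ : Int => ((none : Option Int), true)) s k
  have hg1' : ((PySem.Dict.mk p).items.foldl
      (fun s kv => if s.contains kv.1 then s
                   else s.insert kv.1 ((fun _ : Int => ((none : Option Int), true)) kv.2)) s).get? k
      = (if s.contains k then s.get? k
         else (((PySem.Dict.mk p).get? k).map (fun _ => ((none : Option Int), true)))) := by
    rw [hg1]
    by_cases hc : s.contains k
    · simp [hc]
    · rw [if_neg hc, if_neg hc]
      show _ = (Option.map _ (Option.map _ _))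
      rw [Option.map_map]
      rfl
  rw [e, fold2_get? _ (fun k r => (r.1, r.2 && ((PySem.Dict.mk p).get? k == r.1))) _ hnd1 k]
  have hfind : ((PySem.Dict.mk p).items.foldl
      (fun s kv => if s.contains kv.1 then s
                   else s.insert kv.1 ((fun _ : Int => ((none : Option Int), true)) kv.2)) s).items.find?
        (fun kr => kr.1 == k)
      = (((PySem.Dict.mk p).items.foldl
      (fun s kv => if s.contains kv.1 then s
                   else s.insert kv.1 ((fun _ : Int => ((none : Option Int), true)) kv.2)) s).get? k).map
          (fun r => (k, r)) := by
    generalize ((PySem.Dict.mk p).items.foldl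
      (fun s kv => if s.contains kv.1 then s
                   else s.insert kv.1 ((fun _ : Int => ((none : Option Int), true)) kv.2)) s) = s1
    cases hf : s1.items.find? (fun kr => kr.1 == k) with
    | none =>
      have : s1.get? k = none := by
        show (s1.items.find? (fun p => p.1 == k)).map _ = none
        rw [hf]; rfl
      simp [this]
    | some kr =>
      have hpred := List.find?_some hf
      have hk : kr.1 = k := eq_of_beq hpred
      have : s1.get? k = some kr.2 := by
        show (s1.items.find? (fun p => p.1 == k)).map _ = _
        rw [hf]; rfl
      rw [this, Option.map_some]
      rw [show (k, kr.2) = kr from by rw [← hk]]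
  rw [hfind, hg1']
  cases hqq : (if s.contains k then s.get? k
         else (((PySem.Dict.mk p).get? k).map (fun _ => ((none : Option Int), true)))) with
  | none => rfl
  | some r => rfl

theorem stepB_false_keys (p : List (String × Int)) (s : PySem.Dict String (Option Int × Bool)) :
    ((pvStepB p (s, false)).1).keys = PySem.Set.update s.keys (PySem.Dict.mk p).keys := by
  have e : (pvStepB p (s, false)).1
      = (((PySem.Dict.mk p).items.foldl
            (fun s kv => if s.contains kv.1 then s
                         else s.insert kv.1 ((fun _ : Int => ((none : Option Int), true)) kv.2)) s).items.foldl
           (fun s kr => s.insert kr.1 ((fun k r => (r.1, r.2 && ((PySem.Dict.mk p).get? k == r.1))) kr.1 kr.2))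
           ((PySem.Dict.mk p).items.foldl
            (fun s kv => if s.contains kv.1 then s
                         else s.insert kv.1 ((fun _ : Int => ((none : Option Int), true)) kv.2)) s)) := rfl
  rw [e, fold2_keys _ (fun k r => (r.1, r.2 && ((PySem.Dict.mk p).get? k == r.1))) _ (by
    intro kr hkr
    rw [PySem.Dict.contains_eq_decide_mem_keys]
    simp [PySem.Dict.mem_keys_of_mem_items _ hkr]),
    fold1_keys (PySem.Dict.mk p).items (fun _ : Int => ((none : Option Int), true)) s]
  rfl

theorem ofList_append (xs ys : List String) :
    PySem.Set.ofList (xs ++ ys) = PySem.Set.update (PySem.Set.ofList xs) ys := by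
  rw [PySem.Set.ofList_eq_foldl, PySem.Set.ofList_eq_foldl, List.foldl_append]; rfl

-- after the first dict the flag stays False: the outer fold is a fold of the non-first step
theorem foldl_stepB_false (l : List (List (String × Int)))
    (s : PySem.Dict String (Option Int × Bool)) :
    l.foldl (fun st p => pvStepB p st) (s, false)
    = (l.foldl (fun s p => (pvStepB p (s, false)).1) s, false) := by
  induction l generalizing s with
  | nil => rfl
  | cons a t ih =>
    rw [List.foldl_cons, List.foldl_cons,
        show pvStepB a (s, false) = ((pvStepB a (s, false)).1, false) from rfl, ih]

-- the streaming invariant: after the first dict q and then `processed`, status maps exactly the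
-- keys seen so far to (q's value, whether every processed dict agreed with it)
theorem stepB_invariant (q : List (String × Int)) (rest : List (List (String × Int))) :
    ∀ (processed : List (List (String × Int))) (s : PySem.Dict String (Option Int × Bool)),
    s.keys = PySem.Set.ofList ((q :: processed).flatMap (fun p => (PySem.Dict.mk p).keys)) →
    (∀ k, s.get? k = if s.contains k
        then some ((PySem.Dict.mk q).get? k,
             processed.all (fun p => (PySem.Dict.mk p).get? k == (PySem.Dict.mk q).get? k))
        else none) →
    (rest.foldl (fun s p => (pvStepB p (s, false)).1) s).keys
      = PySem.Set.ofList ((q :: (processed ++ rest)).flatMap (fun p => (PySem.Dict.mk p).keys)) ∧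
    ∀ k, (rest.foldl (fun s p => (pvStepB p (s, false)).1) s).get? k
      = if (rest.foldl (fun s p => (pvStepB p (s, false)).1) s).contains k
        then some ((PySem.Dict.mk q).get? k,
             (processed ++ rest).all (fun p => (PySem.Dict.mk p).get? k == (PySem.Dict.mk q).get? k))
        else none := by
  induction rest with
  | nil => intro processed s h1 h2; simpa using ⟨h1, h2⟩
  | cons p rest' ih =>
    intro processed s hkeys hval
    have hnd : s.keys.Nodup := by rw [hkeys]; exact PySem.Set.nodup_ofList _
    have hkeys2 : ((pvStepB p (s, false)).1).keys
        = PySem.Set.ofList ((q :: (processed ++ [p])).flatMap (fun p => (PySem.Dict.mk p).keys)) := by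
      rw [stepB_false_keys, hkeys,
          show ((q :: (processed ++ [p])).flatMap (fun p => (PySem.Dict.mk p).keys))
             = ((q :: processed).flatMap (fun p => (PySem.Dict.mk p).keys)) ++ (PySem.Dict.mk p).keys
           from by simp,
          ofList_append]
    have hval2 : ∀ k, ((pvStepB p (s, false)).1).get? k
        = if ((pvStepB p (s, false)).1).contains k
          then some ((PySem.Dict.mk q).get? k,
               (processed ++ [p]).all (fun p => (PySem.Dict.mk p).get? k == (PySem.Dict.mk q).get? k))
          else none := by
      intro k
      rw [show ((pvStepB p (s, false)).1).contains k
            = (((pvStepB p (s, false)).1).get? k).isSome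
          from PySem.Dict.contains_eq_isSome_get? _ _,
          stepB_false_get? p s hnd k]
      by_cases hc : s.contains k
      · rw [if_pos hc] at *
        rw [hval k, if_pos hc]
        simp [List.all_append]
      · rw [if_neg hc] at *
        have hmem : k ∉ s.keys := by
          intro hm
          exact absurd ((PySem.Dict.contains_iff_mem_keys s k).2 hm) (by simpa using hc)
        have hq : (PySem.Dict.mk q).get? k = none := by
          rw [PySem.Dict.get?_eq_none_iff_not_mem_keys]
          intro hm
          exact hmem (by rw [hkeys, PySem.Set.mem_ofList]
                         exact List.mem_flatMap.2 ⟨q, by simp, hm⟩)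
        have hproc : ∀ p' ∈ processed, (PySem.Dict.mk p').get? k = none := by
          intro p' hp'
          rw [PySem.Dict.get?_eq_none_iff_not_mem_keys]
          intro hm
          exact hmem (by rw [hkeys, PySem.Set.mem_ofList]
                         exact List.mem_flatMap.2 ⟨p', by simp [hp'], hm⟩)
        cases hp : (PySem.Dict.mk p).get? k with
        | none => simp
        | some v =>
          rw [hq]
          have hall : processed.all
              (fun p' => ((PySem.Dict.mk p').get? k == (none : Option Int))) = true :=
            List.all_eq_true.2 (fun p' hp' => by rw [hproc p' hp']; rfl)
          simp [List.all_append, hp]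
    have := ih (processed ++ [p]) ((pvStepB p (s, false)).1) hkeys2 hval2
    simpa [List.append_assoc] using this

-- ===== VERDICT (by name: the statement is the Claim_ definition above) =====
theorem diff_params_py_spec : Claim_equal_diff_params_py := by
  intro ps _
  unfold Spec_diff_params_py
  cases ps with
  | nil => rfl
  | cons q rest =>
    have e0 : pvStepB q (PySem.Dict.empty, true)
        = ((PySem.Dict.mk q).items.foldl
            (fun s kv => if s.contains kv.1 then s
              else s.insert kv.1 ((fun v : Int => ((some v : Option Int), true)) kv.2))
            PySem.Dict.empty, false) := rfl
    have hkeys0 : ((pvStepB q (PySem.Dict.empty, true)).1).keys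
        = PySem.Set.ofList ((q :: ([] : List (List (String × Int)))).flatMap
            (fun p => (PySem.Dict.mk p).keys)) := by
      rw [e0]
      rw [fold1_keys (PySem.Dict.mk q).items (fun v : Int => ((some v : Option Int), true))
          PySem.Dict.empty]
      simp [PySem.Set.ofList_eq_foldl, PySem.Set.update, PySem.Dict.keys]
      rfl
    have hval0 : ∀ k, ((pvStepB q (PySem.Dict.empty, true)).1).get? k
        = if ((pvStepB q (PySem.Dict.empty, true)).1).contains k
          then some ((PySem.Dict.mk q).get? k,
               ([] : List (List (String × Int))).all
                 (fun p => (PySem.Dict.mk p).get? k == (PySem.Dict.mk q).get? k))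
          else none := by
      intro k
      rw [show ((pvStepB q (PySem.Dict.empty, true)).1).contains k
            = (((pvStepB q (PySem.Dict.empty, true)).1).get? k).isSome
          from PySem.Dict.contains_eq_isSome_get? _ _, e0]
      rw [fold1_get? (PySem.Dict.mk q).items (fun v : Int => ((some v : Option Int), true))
          PySem.Dict.empty k]
      rw [if_neg (by rw [PySem.Dict.contains_empty]; simp)]
      cases hf : (PySem.Dict.mk q).items.find? (fun kv => kv.1 == k) with
      | none => simp
      | some kv =>
        have : (PySem.Dict.mk q).get? k = some kv.2 := by
          show ((PySem.Dict.mk q).items.find? (fun p => p.1 == k)).map _ = _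
          rw [hf]; rfl
        simp [this]
    obtain ⟨hK, hV⟩ := stepB_invariant q rest [] ((pvStepB q (PySem.Dict.empty, true)).1)
      hkeys0 hval0
    have hstat : ((q :: rest).foldl (fun st p => pvStepB p st) (PySem.Dict.empty, true)).1
        = rest.foldl (fun s p => (pvStepB p (s, false)).1)
            ((pvStepB q (PySem.Dict.empty, true)).1) := by
      rw [List.foldl_cons,
          show pvStepB q (PySem.Dict.empty, true)
             = ((pvStepB q (PySem.Dict.empty, true)).1, false) from rfl,
          foldl_stepB_false]
    have hAK : (q :: rest).foldl (fun s p => PySem.Set.update s (PySem.Dict.mk p).keys)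
          PySem.Set.empty
        = PySem.Set.ofList ((q :: rest).flatMap (fun p => (PySem.Dict.mk p).keys)) := by
      rw [keyset_foldl_update, PySem.Set.ofList_eq_foldl]
      rfl
    show (PySem.List.sorted ((q :: rest).foldl
            (fun s p => PySem.Set.update s (PySem.Dict.mk p).keys) PySem.Set.empty)
          (fun k => k) false).foldl
        (fun acc key =>
          if ((q :: rest).tail).all (fun p => (PySem.Dict.mk p).get? key
              == (PySem.Dict.mk ((q :: rest).headD [])).get? key)
          then (acc.1, acc.2 ++ [key]) else (acc.1 ++ [key], acc.2)) ([], [])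
      = (PySem.List.sorted (((q :: rest).foldl (fun st p => pvStepB p st)
            (PySem.Dict.empty, true)).1).keys (fun k => k) false).foldl
        (fun acc key =>
          if ((((q :: rest).foldl (fun st p => pvStepB p st)
              (PySem.Dict.empty, true)).1.get? key).getD (none, false)).2
          then (acc.1, acc.2 ++ [key]) else (acc.1 ++ [key], acc.2)) ([], [])
    rw [hAK, hstat, hK]
    apply PySem.List.foldl_congr_mem
    intro acc key hkey
    have hkmem : key ∈ PySem.Set.ofList ((q :: rest).flatMap (fun p => (PySem.Dict.mk p).keys)) :=
      ((PySem.List.sorted_perm _ _ _).mem_iff).1 hkey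
    have hc : (rest.foldl (fun s p => (pvStepB p (s, false)).1)
        ((pvStepB q (PySem.Dict.empty, true)).1)).contains key = true := by
      apply (PySem.Dict.contains_iff_mem_keys _ _).2
      rw [hK]; exact hkmem
    rw [hV key, if_pos hc]
    simp
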